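-- pv_equiv track=rewrite | github.com/Siam344/SwinburneUniversity | SWE30009/Assignment 3/Bubble-Sort-main/Bubble-Sort-main/mutants.py | mutant25
-- ===== SOURCE A (Python) =====
-- def mutant25(arr):
--     n = len(arr)
--     for i in range(n):
--         swapped = False
--         for j in range(0, n - i - 1):
--             arr[j], arr[j + 1] = arr[j + 1], arr[j]  # Mutant: always swap without condition
--             swapped = True
--         if not swapped:
--             break
--     return arr
-- ===== SOURCE B (Python) =====
-- def mutant25(arr):
--     # The unconditional adjacent-swap passes compose to an exact reversal:
--     # pass i left-rotates the prefix of length n-i, and the n-1 rotations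
--     # together reverse the list. Like A, mutate in place and return it.
--     arr.reverse()
--     return arr
-- ===== Notes on version B (the rewrite author's own statement) =====
-- stated objective: faster
-- what changed: Replaced the quadratic cascade of unconditional adjacent swaps (repeated prefix left-rotations) by a single in-place reverse, which is provably the composite permutation.
import Mathlib
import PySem

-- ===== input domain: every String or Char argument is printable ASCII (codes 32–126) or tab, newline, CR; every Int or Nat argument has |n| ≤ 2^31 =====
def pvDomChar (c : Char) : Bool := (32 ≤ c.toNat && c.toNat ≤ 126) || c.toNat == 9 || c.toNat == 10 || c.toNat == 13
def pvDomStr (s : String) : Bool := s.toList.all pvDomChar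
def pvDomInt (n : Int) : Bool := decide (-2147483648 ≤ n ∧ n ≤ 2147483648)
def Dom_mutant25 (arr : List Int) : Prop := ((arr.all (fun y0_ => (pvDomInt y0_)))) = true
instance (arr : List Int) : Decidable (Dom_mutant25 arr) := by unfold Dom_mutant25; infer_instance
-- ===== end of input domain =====

-- B replaces A's quadratic cascade of unconditional adjacent swaps by a single
-- in-place reverse (the composite of A's prefix rotations); like A, B mutates
-- its argument in place and returns it, so side effects match too.


-- ===== PORT A =====
-- arr[j], arr[j+1] = arr[j+1], arr[j]   (indices j, j+1 always in range in A)
def swapStep (a : List Int) (j : Nat) : List Int :=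
  (a.set j (a.getD (j + 1) 0)).set (j + 1) (a.getD j 0)

-- inner 'for j in range(0, n-i-1)' carrying the 'swapped' flag, then
-- 'if not swapped: break' realised by recursing on the remaining i's
def mutant25Outer (n : Nat) (a : List Int) : List Nat → List Int
  | [] => a
  | i :: rest =>
      let st := (List.range (n - i - 1)).foldl
        (fun (st : List Int × Bool) j => (swapStep st.1 j, true)) (a, false)
      if !st.2 then st.1 else mutant25Outer n st.1 rest

def mutant25 (arr : List Int) : List Int :=
  mutant25Outer arr.length arr (List.range arr.length)

-- ===== PORT B =====
def mutant25_alt (arr : List Int) : List Int := arr.reverse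

-- ===== PRECONDITION & SPEC =====
def Spec_mutant25 (arr : List Int) (out : List Int) : Prop := out = mutant25_alt arr
instance (arr : List Int) (out : List Int) : Decidable (Spec_mutant25 arr out) := by unfold Spec_mutant25; infer_instance

-- ===== CLAIM (what is proved, stated in full; the proofs are below) =====
def Claim_equal_mutant25 : Prop := ∀ (arr : List Int), Dom_mutant25 arr → Spec_mutant25 arr (mutant25 arr)

-- ===== LEMMAS AND PROOFS =====

theorem swapStep_cons (y : Int) (a : List Int) (j : Nat) :
    swapStep (y :: a) (j + 1) = y :: swapStep a j := by
  simp [swapStep]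

theorem foldl_swapStep_cons (l : List Nat) (y : Int) :
    ∀ a : List Int,
      l.foldl (fun b j => swapStep b (j + 1)) (y :: a) = y :: l.foldl swapStep a := by
  induction l with
  | nil => intro a; simp
  | cons j t ih => intro a; simp [swapStep_cons, ih]

-- one inner pass left-rotates the window x :: ys in front of t
theorem pass_rotate (ys : List Int) : ∀ (x : Int) (t : List Int),
    (List.range ys.length).foldl swapStep (x :: (ys ++ t)) = ys ++ x :: t := by
  induction ys with
  | nil => intro x t; simp
  | cons y ys ih =>
      intro x t
      have h0 : swapStep (x :: (y :: ys ++ t)) 0 = y :: (x :: (ys ++ t)) := by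
        simp [swapStep]
      calc (List.range (y :: ys).length).foldl swapStep (x :: (y :: ys ++ t))
          = ((List.range ys.length).map Nat.succ).foldl swapStep
              (swapStep (x :: (y :: ys ++ t)) 0) := by
            simp [List.range_succ_eq_map, List.foldl_cons]
        _ = (List.range ys.length).foldl (fun b j => swapStep b (j + 1))
              (y :: (x :: (ys ++ t))) := by
            rw [h0, List.foldl_map]
        _ = y :: (ys ++ x :: t) := by
            rw [foldl_swapStep_cons, ih]
        _ = (y :: ys) ++ x :: t := rfl

-- the carried 'swapped' flag of an inner pass
theorem foldl_flag (l : List Nat) : ∀ (a : List Int) (b : Bool),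
    l.foldl (fun (st : List Int × Bool) j => (swapStep st.1 j, true)) (a, b)
      = (l.foldl swapStep a, b || !l.isEmpty) := by
  induction l with
  | nil => intro a b; simp
  | cons j t ih => intro a b; simp [ih]

-- loop invariant: processed prefix sits reversed at the back
theorem outer_inv : ∀ (u r : List Int),
    mutant25Outer (u.length + r.length) (u ++ r) (List.range' r.length u.length)
      = u.reverse ++ r := by
  intro u
  induction u with
  | nil => intro r; simp [mutant25Outer]
  | cons x ys ih =>
      intro r
      have hn : (x :: ys).length + r.length - r.length - 1 = ys.length := by
        simp
      simp only [List.length_cons, List.range'_succ]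
      rw [mutant25Outer]
      simp only [List.length_cons] at hn
      rw [hn, foldl_flag]
      have hp : (List.range ys.length).foldl swapStep ((x :: ys) ++ r) = ys ++ x :: r := by
        simpa using pass_rotate ys x r
      cases ys with
      | nil => simp
      | cons y ys' =>
          simp only [List.cons_append] at hp ⊢
          rw [hp, if_neg (by simp)]
          have := ih (x :: r)
          simp only [List.length_cons] at this ⊢
          rw [show ys'.length + 1 + 1 + r.length = ys'.length + 1 + (r.length + 1) from by omega]
          simpa using this

-- ===== VERDICT (by name: the statement is the Claim_ definition above) =====
theorem mutant25_spec : Claim_equal_mutant25 := by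
  intro arr _
  show mutant25 arr = mutant25_alt arr
  have := outer_inv arr []
  simpa [mutant25, mutant25_alt, List.range_eq_range'] using this
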